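-- pv_equiv track=rewrite | github.com/Bharatimudigoudra/Love-Analyzer | Love_predictor.py | love_calculator
-- ===== SOURCE A (Python) =====
-- def love_calculator(name1, name2):
--     name1 = name1.lower().replace(" ", "")
--     name2 = name2.lower().replace(" ", "")
--
--     combined_names = name1 + name2
--     true_count = sum(combined_names.count(letter) for letter in "true")
--     love_count = sum(combined_names.count(letter) for letter in "love")
--
--     love_score = int(str(true_count) + str(love_count)) % 101  # Ensuring percentage stays within 0-100
--     return love_score
-- ===== SOURCE B (Python) =====
-- def love_calculator(name1, name2):
--     # One pass over the combined string classifying each character,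
--     # instead of eight separate per-letter .count scans.
--     combined = name1.lower().replace(" ", "") + name2.lower().replace(" ", "")
--     true_count = 0
--     love_count = 0
--     for c in combined:
--         if c in "true":
--             true_count += 1
--         if c in "love":
--             love_count += 1
--     return int(str(true_count) + str(love_count)) % 101
-- ===== Notes on version B (the rewrite author's own statement) =====
-- stated objective: alternative
-- what changed: Replaces A's eight separate per-letter .count scans of the combined string with a single pass that classifies each character into the two counters.
import Mathlib
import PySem

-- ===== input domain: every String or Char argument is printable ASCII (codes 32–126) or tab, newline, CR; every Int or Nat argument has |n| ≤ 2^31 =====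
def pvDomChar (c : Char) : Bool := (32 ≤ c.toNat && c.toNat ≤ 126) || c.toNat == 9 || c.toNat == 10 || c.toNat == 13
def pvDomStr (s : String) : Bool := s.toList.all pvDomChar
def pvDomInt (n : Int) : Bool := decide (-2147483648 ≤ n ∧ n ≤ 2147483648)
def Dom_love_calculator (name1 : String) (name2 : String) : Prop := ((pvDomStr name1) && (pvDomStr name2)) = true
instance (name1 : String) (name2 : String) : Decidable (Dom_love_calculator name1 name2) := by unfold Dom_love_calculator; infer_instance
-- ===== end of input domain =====

-- B replaces A's eight per-letter .count scans of the combined string with a single pass keeping two counters (alternative decomposition).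


-- ===== PORT A =====
def love_calculator (name1 : String) (name2 : String) : Int :=
  let n1 := PySem.Str.replace (PySem.Str.lower name1) " " ""
  let n2 := PySem.Str.replace (PySem.Str.lower name2) " " ""
  let combined_names := n1 ++ n2
  let true_count : Int := ("true".toList.map (fun letter => (PySem.Str.count combined_names (String.ofList [letter]) : Int))).sum
  let love_count : Int := ("love".toList.map (fun letter => (PySem.Str.count combined_names (String.ofList [letter]) : Int))).sum
  -- int(str(t)+str(l)) always parses (digits only), so the .getD 0 default is never taken
  let love_score := PySem.Int.mod ((PySem.Int.ofStr? (PySem.Int.toStr true_count ++ PySem.Int.toStr love_count)).getD 0) 101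
  love_score

-- ===== PORT B =====
def love_calculator_alt (name1 : String) (name2 : String) : Int :=
  let combined := PySem.Str.replace (PySem.Str.lower name1) " " "" ++ PySem.Str.replace (PySem.Str.lower name2) " " ""
  -- the single for-loop with two counters; `c in "true"` for a one-char c is membership of that char
  let tl : Int × Int := combined.toList.foldl (fun (p : Int × Int) c =>
      ((if "true".toList.contains c then p.1 + 1 else p.1),
       (if "love".toList.contains c then p.2 + 1 else p.2))) (0, 0)
  PySem.Int.mod ((PySem.Int.ofStr? (PySem.Int.toStr tl.1 ++ PySem.Int.toStr tl.2)).getD 0) 101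

-- ===== PRECONDITION & SPEC =====
def Spec_love_calculator (name1 : String) (name2 : String) (out : Int) : Prop := out = love_calculator_alt name1 name2
instance (name1 : String) (name2 : String) (out : Int) : Decidable (Spec_love_calculator name1 name2 out) := by unfold Spec_love_calculator; infer_instance

-- ===== CLAIM (what is proved, stated in full; the proofs are below) =====
def Claim_equal_love_calculator : Prop := ∀ (name1 : String) (name2 : String), Dom_love_calculator name1 name2 → Spec_love_calculator name1 name2 (love_calculator name1 name2)

-- ===== LEMMAS AND PROOFS =====

-- substring-count of a single character equals the plain character count
theorem go_single (c : Char) : ∀ (fuel : Nat) (l : List Char) (acc : Nat), l.length ≤ fuel →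
    PySem.Chars.count.go [c] fuel l acc = acc + l.count c := by
  intro fuel
  induction fuel with
  | zero => intro l acc h; cases l with
    | nil => simp [PySem.Chars.count.go]
    | cons x t => simp at h
  | succ n ih => intro l acc h; cases l with
    | nil => simp [PySem.Chars.count.go]
    | cons x t =>
      rw [PySem.Chars.count.go]
      by_cases hx : x = c
      · subst hx
        simp [List.isPrefixOf]
        rw [ih t (acc+1) (by simpa using h)]
        omega
      · have hp : [c].isPrefixOf (x :: t) = false := by
          simp [List.isPrefixOf]
          exact fun h => hx h.symm
        simp [hp, List.count_cons]
        rw [ih t acc (by simpa using h)]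
        simp
        exact hx

theorem count_single (cs : List Char) (c : Char) : PySem.Chars.count cs [c] = cs.count c := by
  simpa [PySem.Chars.count] using go_single c cs.length cs 0 (le_refl _)

-- the sum of per-letter counts over a duplicate-free letter list is one countP over the data
theorem sum_counts (L : List Char) (hL : L.Nodup) (cs : List Char) :
    (L.map (fun c => (cs.count c : Int))).sum = (cs.countP (fun c => L.contains c) : Int) := by
  induction cs with
  | nil => simp
  | cons x t ih =>
    have hmap : (L.map (fun c => ((x :: t).count c : Int)))
        = L.map (fun c => (t.count c : Int) + (if x == c then 1 else 0)) := by
      apply List.map_congr_left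
      intro c _
      rw [List.count_cons]
      push_cast
      split <;> simp
    rw [hmap, PySem.List.sum_map_add_int, ih, PySem.List.sum_map_ite_one_zero,
        List.countP_cons]
    have hcnt : (L.countP (fun c => x == c) : Int) = if L.contains x then 1 else 0 := by
      have hc : L.countP (fun c => x == c) = L.count x := by
        rw [List.count_eq_countP]
        apply List.countP_congr
        intro a _
        simp [BEq.comm]
      rw [hc]
      by_cases hx : x ∈ L
      · rw [List.count_eq_one_of_mem hL hx]
        simp [hx]
      · rw [List.count_eq_zero.mpr hx]
        simp [hx]
    rw [hcnt]
    split <;> push_cast <;> ring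

theorem love_calculator_eq (name1 name2 : String) :
    love_calculator name1 name2 = love_calculator_alt name1 name2 := by
  unfold love_calculator love_calculator_alt
  simp only [PySem.Str.count_eq]
  rw [PySem.List.foldl_prod_mk (f := fun (a : Int) c => if "true".toList.contains c then a + 1 else a)
        (g := fun (a : Int) c => if "love".toList.contains c then a + 1 else a)]
  have hs : ∀ letter : Char, (String.ofList [letter]).toList = [letter] := fun _ => by simp
  simp only [hs, count_single, PySem.List.foldl_if_add_one]
  rw [sum_counts "true".toList (by decide), sum_counts "love".toList (by decide)]
  have ht : (['t','r','u','e'].contains : Char → Bool) = fun c => decide (c = 't') || (decide (c = 'r') || (decide (c = 'u') || decide (c = 'e'))) := by funext c; simp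
  have hl : (['l','o','v','e'].contains : Char → Bool) = fun c => decide (c = 'l') || (decide (c = 'o') || (decide (c = 'v') || decide (c = 'e'))) := by funext c; simp
  simp [ht, hl]

-- ===== VERDICT (by name: the statement is the Claim_ definition above) =====
theorem love_calculator_spec : Claim_equal_love_calculator :=
  fun name1 name2 _ => love_calculator_eq name1 name2
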